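-- pv_equiv track=rewrite | github.com/Yaksh-Projectkmt/AI_LIVE | OomNewAI_Pro_2.3.6_LBBB-RBBB.py | diffoff
-- ===== SOURCE A (Python) =====
-- import math
--
-- def diffoff(x,y):
--     pac=[]
--     count = 0
--     for i in y:
--         count=0
--         for j in x:
--             if i==math.nan:
--                 pass
--             else:
--                 temp = abs(i-j)
--             if temp<=30:#30
--                 count=1
--         if count==1:
--             pac.append(1)
--         else:
--             pac.append(0)
--
--     return pac
-- ===== SOURCE B (Python) =====
-- def diffoff(x, y):
--     s = sorted(x)
--     n = len(s)
--     out = []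
--     for i in y:
--         lo, hi = 0, n
--         while lo < hi:
--             mid = (lo + hi) // 2
--             if s[mid] < i:
--                 lo = mid + 1
--             else:
--                 hi = mid
--         near = (lo < n and s[lo] - i <= 30) or (lo > 0 and i - s[lo - 1] <= 30)
--         out.append(1 if near else 0)
--     return out
-- ===== Notes on version B (the rewrite author's own statement) =====
-- stated objective: faster
-- what changed: B sorts x once and binary-searches each y element's insertion point, testing only the two neighbouring values, instead of A's full scan of x for every y element.
import Mathlib
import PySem

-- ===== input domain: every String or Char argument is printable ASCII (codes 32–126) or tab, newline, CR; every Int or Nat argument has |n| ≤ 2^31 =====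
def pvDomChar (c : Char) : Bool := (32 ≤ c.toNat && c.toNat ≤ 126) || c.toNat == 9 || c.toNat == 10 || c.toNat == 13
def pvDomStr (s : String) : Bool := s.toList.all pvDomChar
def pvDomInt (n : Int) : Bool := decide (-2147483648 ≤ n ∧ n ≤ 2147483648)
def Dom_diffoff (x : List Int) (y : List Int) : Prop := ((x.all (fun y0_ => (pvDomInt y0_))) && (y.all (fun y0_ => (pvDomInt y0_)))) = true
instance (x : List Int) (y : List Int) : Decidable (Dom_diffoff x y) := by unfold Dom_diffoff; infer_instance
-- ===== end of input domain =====

-- B replaces A's O(n*m) rescans of x with sort-once + binary search per y element (objective: faster, measured asymptotic speed-up).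


-- ===== PORT A =====
-- Port of A: for each i in y, scan all of x setting count=1 when |i-j| <= 30.
-- (The 'i == math.nan' test is always False for ints, so temp = abs(i-j) on every step.)
def diffoff (x : List Int) (y : List Int) : List Int :=
  y.foldl (fun pac i =>
    let count : Int :=
      x.foldl (fun count j =>
        let temp : Int := |i - j|
        if temp ≤ 30 then 1 else count) 0
    pac ++ [if count == 1 then (1 : Int) else 0]) []

-- ===== PORT B =====
-- B sorts x once, then binary-searches the insertion point of each i and checks
-- only its two neighbours.  Source B's hand-written while loop is exactly bisect_left's
-- loop (lo,hi; mid=(lo+hi)//2; s[mid]<i → lo=mid+1 else hi=mid), i.e. PySem.List.bisectLeft.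
def diffoff_alt (x : List Int) (y : List Int) : List Int :=
  let s := PySem.List.sorted x (fun v => v)
  let n := s.length
  y.foldl (fun out i =>
    let lo := PySem.List.bisectLeft s i
    let near := (decide (lo < n) && decide (s.getD lo 0 - i ≤ 30)) ||
                (decide (0 < lo) && decide (i - s.getD (lo - 1) 0 ≤ 30))
    out ++ [if near then (1 : Int) else 0]) []

-- ===== PRECONDITION & SPEC =====
def Spec_diffoff (x : List Int) (y : List Int) (out : List Int) : Prop := out = diffoff_alt x y
instance (x : List Int) (y : List Int) (out : List Int) : Decidable (Spec_diffoff x y out) := by unfold Spec_diffoff; infer_instance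

-- ===== CLAIM (what is proved, stated in full; the proofs are below) =====
def Claim_equal_diffoff : Prop := ∀ (x : List Int) (y : List Int), Dom_diffoff x y → Spec_diffoff x y (diffoff x y)

-- ===== LEMMAS AND PROOFS =====

-- A's inner scan computes 1 iff some j in x is within 30 of i.
theorem inner_scan_eq (i : Int) (x : List Int) : ∀ c0 : Int,
    x.foldl (fun count j => let temp : Int := |i - j|; if temp ≤ 30 then 1 else count) c0
      = if x.any (fun j => decide (|i - j| ≤ 30)) then 1 else c0 := by
  induction x with
  | nil => intro c0; simp
  | cons j t ih =>
    intro c0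
    simp only [List.foldl_cons, List.any_cons]
    by_cases h : |i - j| ≤ 30
    · simp [h, ih]
    · simp [h, ih]

-- B's neighbour test on the sorted list answers the same existence question.
theorem near_iff (s : List Int) (hs : s.Pairwise (· ≤ ·)) (i : Int) :
    (((decide (PySem.List.bisectLeft s i < s.length) &&
       decide (s.getD (PySem.List.bisectLeft s i) 0 - i ≤ 30)) ||
      (decide (0 < PySem.List.bisectLeft s i) &&
       decide (i - s.getD (PySem.List.bisectLeft s i - 1) 0 ≤ 30))) = true)
      ↔ s.any (fun j => decide (|i - j| ≤ 30)) = true := by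
  obtain ⟨hle, hlt, hge⟩ := PySem.List.bisectLeft_spec s i hs
  set lo := PySem.List.bisectLeft s i with hlo
  simp only [Bool.or_eq_true, Bool.and_eq_true, decide_eq_true_eq, List.any_eq_true]
  constructor
  · rintro (⟨h1, h2⟩ | ⟨h1, h2⟩)
    · refine ⟨s[lo], List.getElem_mem h1, ?_⟩
      rw [List.getD_eq_getElem s 0 h1] at h2
      have := hge lo h1 le_rfl
      rw [abs_le]
      omega
    · have hlt' : lo - 1 < s.length := by omega
      refine ⟨s[lo - 1], List.getElem_mem hlt', ?_⟩
      rw [List.getD_eq_getElem s 0 hlt'] at h2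
      have := hlt (lo - 1) hlt' (by omega)
      rw [abs_le]
      omega
  · rintro ⟨j, hj, hd⟩
    rw [abs_le] at hd
    obtain ⟨k, hk, rfl⟩ := List.getElem_of_mem hj
    have hmono : ∀ p q (hp : p ≤ q) (hq : q < s.length), s[p]'(by omega) ≤ s[q] := by
      intro p q hp hq
      rcases eq_or_lt_of_le hp with rfl | hlt'
      · exact le_rfl
      · exact (List.pairwise_iff_getElem.mp hs) p q (by omega) hq hlt'
    by_cases hik : i ≤ s[k]
    · -- some element ≥ i exists, so lo < length and s[lo] ≤ s[k]
      have hlon : lo < s.length := by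
        by_contra hno
        have : k < lo := by omega
        have := hlt k hk this
        omega
      left
      refine ⟨hlon, ?_⟩
      rw [List.getD_eq_getElem s 0 hlon]
      have hklo : lo ≤ k := by
        by_contra hno
        have := hlt k hk (by omega)
        omega
      have := hmono lo k hklo hk
      omega
    · -- s[k] < i, so k < lo, hence 0 < lo and s[k] ≤ s[lo-1] < i
      have hklo : k < lo := by
        by_contra hno
        have := hge k hk (by omega)
        omega
      right
      have h0 : 0 < lo := by omega
      refine ⟨h0, ?_⟩
      have hl1 : lo - 1 < s.length := by omega
      rw [List.getD_eq_getElem s 0 hl1]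
      have := hmono k (lo - 1) (by omega) hl1
      have := hlt (lo - 1) hl1 (by omega)
      omega

-- Each side is the pointwise map of its per-element answer over y.
theorem foldl_append_map {f : Int → Int} (y : List Int) : ∀ acc : List Int,
    y.foldl (fun out i => out ++ [f i]) acc = acc ++ y.map f := by
  induction y with
  | nil => intro acc; simp
  | cons i t ih => intro acc; simp [ih]

-- ===== VERDICT (by name: the statement is the Claim_ definition above) =====
theorem diffoff_spec : Claim_equal_diffoff := by
  intro x y _
  unfold Spec_diffoff diffoff diffoff_alt
  rw [foldl_append_map (f := fun i =>
        if (x.foldl (fun count j => let temp : Int := |i - j|; if temp ≤ 30 then 1 else count) 0) == 1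
        then (1 : Int) else 0) y []]
  rw [foldl_append_map (f := fun i =>
        if ((decide (PySem.List.bisectLeft (PySem.List.sorted x (fun v => v)) i < (PySem.List.sorted x (fun v => v)).length) &&
             decide ((PySem.List.sorted x (fun v => v)).getD (PySem.List.bisectLeft (PySem.List.sorted x (fun v => v)) i) 0 - i ≤ 30)) ||
            (decide (0 < PySem.List.bisectLeft (PySem.List.sorted x (fun v => v)) i) &&
             decide (i - (PySem.List.sorted x (fun v => v)).getD (PySem.List.bisectLeft (PySem.List.sorted x (fun v => v)) i - 1) 0 ≤ 30)))
        then (1 : Int) else 0) y []]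
  simp only [List.nil_append]
  apply List.map_congr_left
  intro i _
  have hs := PySem.List.sorted_pairwise x (fun v => v)
  have hperm := PySem.List.sorted_perm x (fun v => v) false
  rw [inner_scan_eq i x 0]
  have hany : (PySem.List.sorted x (fun v => v)).any (fun j => decide (|i - j| ≤ 30))
      = x.any (fun j => decide (|i - j| ≤ 30)) := by
    cases hA : x.any (fun j => decide (|i - j| ≤ 30)) with
    | true =>
      simp only [List.any_eq_true] at hA ⊢
      obtain ⟨j, hj, hd⟩ := hA
      exact ⟨j, hperm.mem_iff.mpr hj, hd⟩
    | false =>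
      simp only [List.any_eq_false] at hA ⊢
      intro j hj; exact hA j (hperm.mem_iff.mp hj)
  have hnear := near_iff (PySem.List.sorted x (fun v => v)) hs i
  rw [hany] at hnear
  have hne : ((decide (PySem.List.bisectLeft (PySem.List.sorted x (fun v => v)) i < (PySem.List.sorted x (fun v => v)).length) &&
       decide ((PySem.List.sorted x (fun v => v)).getD (PySem.List.bisectLeft (PySem.List.sorted x (fun v => v)) i) 0 - i ≤ 30)) ||
      (decide (0 < PySem.List.bisectLeft (PySem.List.sorted x (fun v => v)) i) &&
       decide (i - (PySem.List.sorted x (fun v => v)).getD (PySem.List.bisectLeft (PySem.List.sorted x (fun v => v)) i - 1) 0 ≤ 30)))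
      = x.any (fun j => decide (|i - j| ≤ 30)) := by
    cases hA : x.any (fun j => decide (|i - j| ≤ 30)) with
    | true => rw [hA] at hnear; exact hnear.mpr rfl
    | false =>
      rw [hA] at hnear
      exact Bool.eq_false_iff.mpr (fun hb => absurd (hnear.mp hb) (by decide))
  rw [hne]
  cases x.any (fun j => decide (|i - j| ≤ 30)) <;> simp
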